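-- pv_equiv track=rewrite | github.com/maglkp/leetcode | dp/lengthOfLis.py | lengthOfLIS_invalid
-- ===== SOURCE A (Python) =====
-- from typing import List
--
-- def lengthOfLIS_invalid(nums: List[int]) -> int:
--
--     max_lis = 0
--     for i in range(len(nums)):
--         lis = 1
--         max_el = nums[i]
--         for j in range(i + 1, len(nums)):
--             if nums[j] > max_el:
--                 max_el = nums[j]
--                 lis += 1
--
--         max_lis = max(max_lis, lis)
--
--     return max_lis
-- ===== SOURCE B (Python) =====
-- from typing import List
--
-- def lengthOfLIS_invalid(nums: List[int]) -> int:
--     # O(n) monotonic stack, right to left: after processing position i the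
--     # stack holds exactly the "record" values of the suffix nums[i:]
--     # (bottom-to-top decreasing); its size is A's inner greedy count for i.
--     best = 0
--     stack = []
--     for x in reversed(nums):
--         while stack and stack[-1] <= x:
--             stack.pop()
--         stack.append(x)
--         if len(stack) > best:
--             best = len(stack)
--     return best
-- ===== Notes on version B (the rewrite author's own statement) =====
-- stated objective: faster
-- what changed: Replaced the quadratic per-index greedy rescan of each suffix by a single right-to-left pass with a monotonic stack whose size equals the greedy record count of the current suffix.
import Mathlib
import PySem

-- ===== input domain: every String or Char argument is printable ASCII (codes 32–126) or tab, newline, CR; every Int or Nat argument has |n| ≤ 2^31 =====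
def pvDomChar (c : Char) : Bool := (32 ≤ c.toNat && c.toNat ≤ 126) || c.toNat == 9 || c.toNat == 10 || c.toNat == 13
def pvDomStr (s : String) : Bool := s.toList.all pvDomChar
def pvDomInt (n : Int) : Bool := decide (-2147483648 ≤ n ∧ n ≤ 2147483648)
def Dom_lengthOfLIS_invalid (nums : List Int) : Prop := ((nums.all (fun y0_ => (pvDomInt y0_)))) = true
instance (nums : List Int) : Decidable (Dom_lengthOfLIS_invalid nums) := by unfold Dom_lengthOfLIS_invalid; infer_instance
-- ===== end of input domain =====

-- B replaces A's quadratic per-index greedy rescan of every suffix by one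
-- right-to-left pass with a monotonic stack (asymptotically faster).


-- ===== PORT A =====
def lengthOfLIS_invalid (nums : List Int) : Int :=
  (PySem.List.pyRange 0 nums.length 1).foldl
    (fun max_lis i =>
      let inner :=
        (PySem.List.pyRange (i + 1) nums.length 1).foldl
          (fun (st : Int × Int) j =>
            if PySem.List.pyGetD nums j 0 > st.2
            then (st.1 + 1, PySem.List.pyGetD nums j 0) else st)
          (1, PySem.List.pyGetD nums i 0)
      max max_lis inner.1)
    0

-- ===== PORT B =====
-- the while-pop loop of Source B (stack top at the head)
def pvPop (x : Int) : List Int → List Int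
  | [] => []
  | t :: rest => if t ≤ x then pvPop x rest else t :: rest

def lengthOfLIS_invalid_alt (nums : List Int) : Int :=
  (nums.foldr
    (fun x (st : List Int × Int) =>
      let s := x :: pvPop x st.1
      if (s.length : Int) > st.2 then (s, (s.length : Int)) else (s, st.2))
    ([], 0)).2

-- ===== PRECONDITION & SPEC =====
def Spec_lengthOfLIS_invalid (nums : List Int) (out : Int) : Prop := out = lengthOfLIS_invalid_alt nums
instance (nums : List Int) (out : Int) : Decidable (Spec_lengthOfLIS_invalid nums out) := by unfold Spec_lengthOfLIS_invalid; infer_instance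

-- ===== CLAIM (what is proved, stated in full; the proofs are below) =====
def Claim_equal_lengthOfLIS_invalid : Prop := ∀ (nums : List Int), Dom_lengthOfLIS_invalid nums → Spec_lengthOfLIS_invalid nums (lengthOfLIS_invalid nums)

-- ===== LEMMAS AND PROOFS =====

-- the record (strict prefix-maxima) values of a list, in order
def pvRecords : List Int → List Int
  | [] => []
  | x :: xs => x :: (pvRecords xs).filter (fun y => decide (x < y))

-- greedy count of records strictly above an accumulator m (A's inner loop)
def pvCountAbove (m : Int) : List Int → Nat
  | [] => 0
  | y :: ys => if m < y then 1 + pvCountAbove y ys else pvCountAbove m ys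

-- max over nonempty suffixes of the record count (0 for [])
def pvM : List Int → Int
  | [] => 0
  | x :: xs => max (pvM xs) ((pvRecords (x :: xs)).length : Int)

theorem pvRecords_pairwise : ∀ xs : List Int, (pvRecords xs).Pairwise (· < ·) := by
  intro xs
  induction xs with
  | nil => simp [pvRecords]
  | cons a t ih =>
    simp only [pvRecords, List.pairwise_cons]
    refine ⟨?_, ih.filter _⟩
    intro y hy
    simpa using (List.of_mem_filter hy)

theorem pvPop_pairwise (x : Int) : ∀ l : List Int, l.Pairwise (· < ·) →
    pvPop x l = l.filter (fun y => decide (x < y)) := by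
  intro l hl
  induction l with
  | nil => rfl
  | cons a t ih =>
    rcases List.pairwise_cons.mp hl with ⟨ha, ht⟩
    by_cases hax : a ≤ x
    · have h1 : ¬ x < a := not_lt.mpr hax
      simp only [pvPop, if_pos hax, List.filter_cons, h1, decide_false]
      exact ih ht
    · rw [not_le] at hax
      simp only [pvPop, if_neg (not_le.mpr hax), List.filter_cons, hax, decide_true, ite_true]
      congr 1
      refine (List.filter_eq_self.mpr ?_).symm
      intro y hy
      have := ha y hy
      simp; omega

theorem pvLenFilter : ∀ (xs : List Int) (x : Int),
    ((pvRecords xs).filter (fun y => decide (x < y))).length = pvCountAbove x xs := by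
  intro xs
  induction xs with
  | nil => intro x; rfl
  | cons y ys ih =>
    intro x
    simp only [pvRecords, List.filter_cons, pvCountAbove, List.filter_filter]
    by_cases h : x < y
    · have hp : (fun a => decide (x < a) && decide (y < a)) = (fun a => decide (y < a)) := by
        funext a; by_cases hya : y < a
        · simp [hya, show x < a by omega]
        · simp [hya]
      simp only [h, decide_true, ite_true, List.length_cons, hp, ih]
      omega
    · have hp : (fun a => decide (x < a) && decide (y < a)) = (fun a => decide (x < a)) := by
        funext a; by_cases hxa : x < a
        · simp [hxa, show y < a by omega]
        · simp [hxa]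
      simp [h, hp, ih]

theorem pvRecords_length (x : Int) (xs : List Int) :
    (pvRecords (x :: xs)).length = 1 + pvCountAbove x xs := by
  simp [pvRecords, pvLenFilter]; omega

-- A's inner fold computes the greedy count
theorem pvInner_foldl : ∀ (suf : List Int) (c m : Int),
    (suf.foldl (fun (st : Int × Int) nj => if nj > st.2 then (st.1 + 1, nj) else st) (c, m)).1
      = c + (pvCountAbove m suf : Int) := by
  intro suf
  induction suf with
  | nil => intro c m; simp [pvCountAbove]
  | cons y ys ih =>
    intro c m
    by_cases h : m < y
    · simp only [List.foldl_cons, pvCountAbove, if_pos h, gt_iff_lt, ih]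
      push_cast; ring
    · simp only [List.foldl_cons, pvCountAbove, if_neg h, gt_iff_lt, ih]

-- B's fold maintains (records of suffix, max so far)
theorem pvAlt_foldr : ∀ nums : List Int,
    (nums.foldr
      (fun x (st : List Int × Int) =>
        let s := x :: pvPop x st.1
        if (s.length : Int) > st.2 then (s, (s.length : Int)) else (s, st.2))
      ([], 0)) = (pvRecords nums, pvM nums) := by
  intro nums
  induction nums with
  | nil => simp [pvRecords, pvM]
  | cons x xs ih =>
    simp only [List.foldr_cons, ih]
    have hs : x :: pvPop x (pvRecords xs) = pvRecords (x :: xs) := by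
      rw [pvPop_pairwise x _ (pvRecords_pairwise xs)]; rfl
    simp only [hs]
    by_cases h : ((pvRecords (x :: xs)).length : Int) > pvM xs
    · simp only [if_pos h, pvM]; rw [max_eq_right (le_of_lt h)]
    · simp only [if_neg h, pvM]; rw [max_eq_left (by omega)]

-- folding max with a different initial value
theorem pvFoldl_max_init (g : Nat → Int) : ∀ (L : List Nat) (a b : Int),
    L.foldl (fun acc i => max acc (g i)) (max a b)
      = max b (L.foldl (fun acc i => max acc (g i)) a) := by
  intro L
  induction L with
  | nil => intro a b; simp [max_comm]
  | cons i L ih =>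
    intro a b
    simp only [List.foldl_cons]
    rw [show max (max a b) (g i) = max (max a (g i)) b by
          rw [max_comm a b, max_assoc, max_comm]]
    exact ih _ _

-- A's outer fold equals pvM
theorem pvRangeFold_eq_pvM : ∀ nums : List Int,
    (List.range nums.length).foldl
      (fun acc i => max acc ((pvRecords (nums.drop i)).length : Int)) 0 = pvM nums := by
  intro nums
  induction nums with
  | nil => simp [pvM]
  | cons x xs ih =>
    rw [List.length_cons, List.range_succ_eq_map, List.foldl_cons, List.foldl_map]
    simp only [Nat.succ_eq_add_one, List.drop_succ_cons, List.drop_zero]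
    rw [show (max 0 ((pvRecords (x :: xs)).length : Int))
          = max (0 : Int) ((pvRecords (x :: xs)).length : Int) from rfl]
    rw [pvFoldl_max_init, ih, pvM, max_comm]

-- ===== VERDICT (by name: the statement is the Claim_ definition above) =====
theorem lengthOfLIS_invalid_spec : Claim_equal_lengthOfLIS_invalid := by
  intro nums _
  unfold Spec_lengthOfLIS_invalid lengthOfLIS_invalid lengthOfLIS_invalid_alt
  rw [pvAlt_foldr]
  rw [PySem.List.pyRange_one]
  simp only [Int.sub_zero, Int.toNat_natCast, List.foldl_map, zero_add]
  rw [PySem.List.foldl_congr_mem (List.range nums.length) _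
        (fun acc k => max acc ((pvRecords (nums.drop k)).length : Int)) 0 ?_]
  · exact pvRangeFold_eq_pvM nums
  · intro acc k hk
    have hk' : k < nums.length := List.mem_range.mp hk
    have h1 : ((PySem.List.pyRange ((k : Int) + 1) (nums.length : Int) 1).foldl
        (fun (st : Int × Int) j =>
          if PySem.List.pyGetD nums j 0 > st.2
          then (st.1 + 1, PySem.List.pyGetD nums j 0) else st)
        (1, PySem.List.pyGetD nums (k : Int) 0))
        = (nums.drop ((((k : Int) + 1)).toNat)).foldl
            (fun (st : Int × Int) v => if v > st.2 then (st.1 + 1, v) else st)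
            (1, PySem.List.pyGetD nums (k : Int) 0) :=
      PySem.List.foldl_pyRange_pyGetD' nums 0
        (fun (st : Int × Int) v => if v > st.2 then (st.1 + 1, v) else st) _ (by omega)
    simp only [h1]
    have h2 : (((k : Int) + 1)).toNat = k + 1 := by omega
    have h3 : PySem.List.pyGetD nums (k : Int) 0 = nums[k] := by
      rw [PySem.List.pyGetD_natCast, List.getD_eq_getElem _ _ hk']
    rw [h2, h3, pvInner_foldl, ← List.getElem_cons_drop hk', pvRecords_length]
    push_cast
    ring_nf
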